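-- pv_equiv track=rewrite | github.com/PashaShahbazi/pasha_lexer | pasha_lexer.py | al
-- ===== SOURCE A (Python) =====
-- def al(lexim):
--     j = 0
--     state = 0
--     while True:
--         ch = lexim[j]
--         match state:
--             case 0:
--                 if ch == 'a':
--                     state = 1
--                     j += 1
--                 else:
--                     state = 3
--             case 1:
--                 if ch == 'l':
--                     state = 2
--                     j += 1
--                 else:
--                     state = 3
--             case 2:
--                 if ch == '\n':
--                     return True, '<else>'
--                 else:
--                     state = 3
--             case 3:
--                 return False, None
-- ===== SOURCE B (Python) =====
-- def al(lexim):
--     for i, ch in enumerate('al\n'):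
--         if lexim[i] != ch:
--             return False, None
--     return True, '<else>'
-- ===== Notes on version B (the rewrite author's own statement) =====
-- stated objective: idiomatic
-- what changed: Replaces the explicit integer state machine with a single pattern-driven loop over the target string 'al\n', comparing lexim[i] to the expected character and returning (False, None) on the first mismatch.
import Mathlib
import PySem

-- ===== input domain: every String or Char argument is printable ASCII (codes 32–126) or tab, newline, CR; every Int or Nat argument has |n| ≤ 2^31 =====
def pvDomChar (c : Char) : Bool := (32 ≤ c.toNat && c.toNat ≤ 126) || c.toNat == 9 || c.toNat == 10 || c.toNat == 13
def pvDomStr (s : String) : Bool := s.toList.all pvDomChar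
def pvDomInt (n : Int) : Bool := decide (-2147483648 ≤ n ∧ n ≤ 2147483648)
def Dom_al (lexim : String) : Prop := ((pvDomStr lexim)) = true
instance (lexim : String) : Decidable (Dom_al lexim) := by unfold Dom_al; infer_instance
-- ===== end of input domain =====

-- B replaces A's explicit integer state machine by one pattern-driven loop over the
-- target 'al\n', comparing characters and failing on the first mismatch (idiomatic).


-- ===== PORT A =====
-- the while-True state machine; state strictly increases on every non-returning
-- iteration, so the loop is recursion decreasing in 3 - state.
-- lexim[j] is PySem.List.pyGet?; the none (IndexError) case is excluded by Pre_al.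
def alLoop (cs : List Char) (j state : Nat) : Bool × Option String :=
  match PySem.List.pyGet? cs (j : Int) with
  | none => (false, none)   -- IndexError in Python; outside Pre_al
  | some ch =>
    if state = 0 then
      if ch = 'a' then alLoop cs (j + 1) 1 else alLoop cs j 3
    else if state = 1 then
      if ch = 'l' then alLoop cs (j + 1) 2 else alLoop cs j 3
    else if state = 2 then
      if ch = '\n' then (true, some "<else>") else alLoop cs j 3
    else (false, none)
termination_by 3 - state
decreasing_by all_goals omega

def al (lexim : String) : Bool × Option String := alLoop lexim.toList 0 0

-- ===== PORT B =====
-- loop 'for i, ch in enumerate("al\n")': recursion over the remaining target chars,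
-- carrying the index i; lexim[i] is pyGet?, none (IndexError) excluded by Pre_al.
def alAltLoop (cs : List Char) (target : List Char) (i : Nat) : Bool × Option String :=
  match target with
  | [] => (true, some "<else>")
  | t :: ts =>
    match PySem.List.pyGet? cs (i : Int) with
    | none => (false, none)   -- IndexError in Python; outside Pre_al
    | some ch => if ch ≠ t then (false, none) else alAltLoop cs ts (i + 1)

def al_alt (lexim : String) : Bool × Option String := alAltLoop lexim.toList ['a', 'l', '\n'] 0

-- ===== PRECONDITION & SPEC =====
-- Pre_al excludes exactly the inputs where Python A raises IndexError:
-- the proper prefixes '', 'a', 'al' of the target (B raises there too).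
def Pre_al (lexim : String) : Prop := lexim ≠ "" ∧ lexim ≠ "a" ∧ lexim ≠ "al"
instance (lexim : String) : Decidable (Pre_al lexim) := by unfold Pre_al; infer_instance
def pvWitness_al : String := "al\n"

def Spec_al (lexim : String) (out : Bool × Option String) : Prop := out = al_alt lexim
instance (lexim : String) (out : Bool × Option String) : Decidable (Spec_al lexim out) := by unfold Spec_al; infer_instance

-- ===== CLAIM (what is proved, stated in full; the proofs are below) =====
def Claim_equal_al : Prop := ∀ (lexim : String), Dom_al lexim → Pre_al lexim → Spec_al lexim (al lexim)

-- ===== LEMMAS AND PROOFS =====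

theorem pyGet_one (a b : Char) (r : List Char) :
    PySem.List.pyGet? (a :: b :: r) (1 : Int) = some b := by
  simp

theorem pyGet_two (a b c : Char) (r : List Char) :
    PySem.List.pyGet? (a :: b :: c :: r) (2 : Int) = some c := by
  have h := PySem.List.pyGet?_cons_succ (x := a) (xs := b :: c :: r) (n := 1)
  simpa [pyGet_one] using h

theorem alLoop_eq_alt (cs : List Char)
    (h0 : cs ≠ []) (h1 : cs ≠ ['a']) (h2 : cs ≠ ['a', 'l']) :
    alLoop cs 0 0 = alAltLoop cs ['a', 'l', '\n'] 0 := by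
  match cs, h0 with
  | c :: rest, _ =>
    by_cases hc : c = 'a'
    · subst hc
      match rest with
      | [] => exact absurd rfl h1
      | d :: rest2 =>
        by_cases hd : d = 'l'
        · subst hd
          match rest2 with
          | [] => exact absurd rfl h2
          | e :: rest3 =>
            by_cases he : e = '\n' <;>
              simp [alLoop, alAltLoop, pyGet_one, pyGet_two, he]
        · simp [alLoop, alAltLoop, hd]
    · simp [alLoop, alAltLoop, hc]

theorem toList_ne (s t : String) (h : s ≠ t) : s.toList ≠ t.toList := by
  intro hl; exact h (String.toList_inj.mp hl)

-- ===== VERDICT =====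
theorem al_spec : Claim_equal_al := by
  intro lexim _ hpre
  unfold Spec_al al al_alt
  exact alLoop_eq_alt _ (toList_ne _ "" hpre.1) (toList_ne _ "a" hpre.2.1)
    (toList_ne _ "al" hpre.2.2)
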